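-- pv_equiv track=rewrite | github.com/CloudAloud/Prometheus-Python-labs | Python/8.4-make_sudoku3.py | make_sudoku
-- ===== SOURCE A (Python) =====
-- def make_sudoku(size):
--
--     field = []
--     for j in range(size):
--         for n in range(size):
--             line = []
--             for i in range(size**2):
--                 line.append((i + j + n * size) % (size**2) + 1)
--             field.append(line)
--     return field
-- ===== SOURCE B (Python) =====
-- def make_sudoku(size):
--     if size <= 0:
--         return []
--     base = list(range(1, size ** 2 + 1))
--     field = []
--     for j in range(size):
--         for n in range(size):
--             offset = j + n * size
--             field.append(base[offset:] + base[:offset])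
--     return field
-- ===== Notes on version B (the rewrite author's own statement) =====
-- stated objective: simpler
-- what changed: B precomputes the base row 1..size^2 once and builds each row as a slice-based rotation base[offset:]+base[:offset], eliminating A's innermost per-element modular-arithmetic loop.
import Mathlib
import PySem

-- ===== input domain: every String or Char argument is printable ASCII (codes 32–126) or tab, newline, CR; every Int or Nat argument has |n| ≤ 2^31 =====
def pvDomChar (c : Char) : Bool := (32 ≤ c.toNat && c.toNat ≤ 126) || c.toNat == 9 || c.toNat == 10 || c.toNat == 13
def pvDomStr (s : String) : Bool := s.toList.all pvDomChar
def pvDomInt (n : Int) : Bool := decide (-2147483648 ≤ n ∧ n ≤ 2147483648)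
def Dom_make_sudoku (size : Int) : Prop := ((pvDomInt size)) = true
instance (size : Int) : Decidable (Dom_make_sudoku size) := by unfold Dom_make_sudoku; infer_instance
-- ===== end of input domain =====

-- B builds the base row 1..size^2 once and emits each row as a slice rotation,
-- removing A's innermost modular-arithmetic loop (objective: simpler).

-- ===== PORT A =====
def make_sudoku (size : Int) : List (List Int) :=
  (PySem.List.pyRange 0 size 1).foldl (fun field j =>
    (PySem.List.pyRange 0 size 1).foldl (fun field n =>
      field ++ [(PySem.List.pyRange 0 (size ^ 2) 1).foldl
        (fun line i => line ++ [PySem.Int.mod (i + j + n * size) (size ^ 2) + 1]) []]) field) []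

-- ===== PORT B =====
def make_sudoku_alt (size : Int) : List (List Int) :=
  if size ≤ 0 then []
  else
  let base := PySem.List.pyRange 1 (size ^ 2 + 1) 1
  (PySem.List.pyRange 0 size 1).foldl (fun field j =>
    (PySem.List.pyRange 0 size 1).foldl (fun field n =>
      let offset := j + n * size
      field ++ [PySem.List.slice base (some offset) none ++
                PySem.List.slice base none (some offset)]) field) []

-- ===== PRECONDITION & SPEC =====
def Spec_make_sudoku (size : Int) (out : List (List Int)) : Prop := out = make_sudoku_alt size
instance (size : Int) (out : List (List Int)) : Decidable (Spec_make_sudoku size out) := by unfold Spec_make_sudoku; infer_instance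

-- ===== CLAIM (what is proved, stated in full; the proofs are below) =====
def Claim_equal_make_sudoku : Prop := ∀ (size : Int), Dom_make_sudoku size → Spec_make_sudoku size (make_sudoku size)

-- ===== LEMMAS AND PROOFS =====

lemma map_add_pyRange (a b c : Int) :
    (PySem.List.pyRange a b 1).map (fun i => i + c) = PySem.List.pyRange (a + c) (b + c) 1 := by
  rw [PySem.List.pyRange_one, PySem.List.pyRange_one, List.map_map]
  have h : b + c - (a + c) = b - a := by ring
  rw [h]
  exact List.map_congr_left (fun k _ => by simp [Function.comp]; ring)

lemma row_eq (m off : Int) (hm : 0 < m) (h0 : 0 ≤ off) (h1 : off < m) :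
    (PySem.List.pyRange 0 m 1).map (fun i => PySem.Int.mod (i + off) m + 1)
      = (PySem.List.pyRange 1 (m + 1) 1).drop off.toNat ++
        (PySem.List.pyRange 1 (m + 1) 1).take off.toNat := by
  have hsplit : PySem.List.pyRange 0 m 1
      = PySem.List.pyRange 0 (m - off) 1 ++ PySem.List.pyRange (m - off) m 1 :=
    PySem.List.pyRange_one_append 0 (m - off) m (by omega) (by omega)
  have hbase : PySem.List.pyRange 1 (m + 1) 1
      = PySem.List.pyRange 1 (1 + off) 1 ++ PySem.List.pyRange (1 + off) (m + 1) 1 :=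
    PySem.List.pyRange_one_append 1 (1 + off) (m + 1) (by omega) (by omega)
  have hlen : (PySem.List.pyRange 1 (1 + off) 1).length = off.toNat := by
    rw [PySem.List.length_pyRange_one]; omega
  have hdrop : (PySem.List.pyRange 1 (m + 1) 1).drop off.toNat
      = PySem.List.pyRange (1 + off) (m + 1) 1 := by
    rw [hbase, List.drop_append_of_le_length (by omega), List.drop_of_length_le (by omega),
        List.nil_append]
  have htake : (PySem.List.pyRange 1 (m + 1) 1).take off.toNat
      = PySem.List.pyRange 1 (1 + off) 1 := by
    rw [hbase, List.take_append_of_le_length (by omega), List.take_of_length_le (by omega)]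
  rw [hdrop, htake, hsplit, List.map_append]
  have hfst : (PySem.List.pyRange 0 (m - off) 1).map (fun i => PySem.Int.mod (i + off) m + 1)
      = PySem.List.pyRange (1 + off) (m + 1) 1 := by
    have := map_add_pyRange 0 (m - off) (off + 1)
    rw [show (0 : Int) + (off + 1) = 1 + off by ring, show m - off + (off + 1) = m + 1 by ring] at this
    rw [← this]
    refine List.map_congr_left (fun i hi => ?_)
    rw [PySem.List.mem_pyRange_one] at hi
    rw [PySem.Int.mod_eq_emod_of_pos hm, Int.emod_eq_of_lt (by omega) (by omega)]
    ring
  have hsnd : (PySem.List.pyRange (m - off) m 1).map (fun i => PySem.Int.mod (i + off) m + 1)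
      = PySem.List.pyRange 1 (1 + off) 1 := by
    have := map_add_pyRange (m - off) m (off + 1 - m)
    rw [show m - off + (off + 1 - m) = 1 by ring, show m + (off + 1 - m) = 1 + off by ring] at this
    rw [← this]
    refine List.map_congr_left (fun i hi => ?_)
    rw [PySem.List.mem_pyRange_one] at hi
    rw [PySem.Int.mod_eq_emod_of_pos hm,
        show i + off = (i + off - m) + m by ring, Int.add_emod_right,
        Int.emod_eq_of_lt (by omega) (by omega)]
    ring
  rw [hfst, hsnd]

lemma off_bounds (size j n : Int) (hj0 : 0 ≤ j) (hj1 : j < size)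
    (hn0 : 0 ≤ n) (hn1 : n < size) : 0 ≤ j + n * size ∧ j + n * size < size ^ 2 := by
  have hmul : n * size ≤ (size - 1) * size :=
    mul_le_mul_of_nonneg_right (by omega) (by omega)
  have hmul0 : 0 ≤ n * size := mul_nonneg hn0 (by omega)
  have he : (size - 1) * size = size * size - size := by ring
  have hsq : size ^ 2 = size * size := by ring
  omega

-- ===== VERDICT (by name: the statement is the Claim_ definition above) =====
theorem make_sudoku_spec : Claim_equal_make_sudoku := by
  intro size _
  unfold Spec_make_sudoku make_sudoku make_sudoku_alt
  by_cases hs : size ≤ 0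
  · rw [if_pos hs, PySem.List.pyRange_one_eq_nil hs]
    rfl
  rw [if_neg hs]
  simp only []
  refine PySem.List.foldl_congr_mem _ _ _ _ (fun field j hj => ?_)
  refine PySem.List.foldl_congr_mem _ _ _ _ (fun field' n hn => ?_)
  rw [PySem.List.mem_pyRange_one] at hj hn
  obtain ⟨hoff0, hoff1⟩ := off_bounds size j n hj.1 hj.2 hn.1 hn.2
  have hm : 0 < size ^ 2 := by omega
  congr 1
  rw [PySem.List.foldl_append_singleton_eq_map, List.nil_append,
      PySem.List.slice_from _ hoff0, PySem.List.slice_to _ hoff0]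
  have := row_eq (size ^ 2) (j + n * size) hm hoff0 hoff1
  rw [← this]
  congr 1
  exact List.map_congr_left (fun i _ => by rw [add_assoc])
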